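-- pv_equiv track=rewrite | github.com/timothy-welch/CS88 | labs/lab06.py | has_seven
-- ===== SOURCE A (Python) =====
-- def has_seven(k):
--     """Returns True if at least one of the digits of k is a 7, False otherwise.
--
--     >>> has_seven(3)
--     False
--     >>> has_seven(7)
--     True
--     >>> has_seven(2734)
--     True
--     >>> has_seven(2634)
--     False
--     >>> has_seven(734)
--     True
--     >>> has_seven(7777)
--     True
--     """
--     "*** YOUR CODE HERE ***"
--     if k % 10 == 7:
--         return True
--     elif k < 10:
--         return False
--     else:
--         return has_seven(k//10)
-- ===== SOURCE B (Python) =====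
-- def has_seven(k):
--     if k < 10:
--         return k % 10 == 7
--     digits = []
--     while k >= 10:
--         digits.append(k % 10)
--         k //= 10
--     digits.append(k)
--     return 7 in digits
-- ===== Notes on version B (the rewrite author's own statement) =====
-- stated objective: alternative
-- what changed: Replaces the short-circuiting tail recursion by an iterative loop that materialises the full digit list and then tests membership of 7.
import Mathlib
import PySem

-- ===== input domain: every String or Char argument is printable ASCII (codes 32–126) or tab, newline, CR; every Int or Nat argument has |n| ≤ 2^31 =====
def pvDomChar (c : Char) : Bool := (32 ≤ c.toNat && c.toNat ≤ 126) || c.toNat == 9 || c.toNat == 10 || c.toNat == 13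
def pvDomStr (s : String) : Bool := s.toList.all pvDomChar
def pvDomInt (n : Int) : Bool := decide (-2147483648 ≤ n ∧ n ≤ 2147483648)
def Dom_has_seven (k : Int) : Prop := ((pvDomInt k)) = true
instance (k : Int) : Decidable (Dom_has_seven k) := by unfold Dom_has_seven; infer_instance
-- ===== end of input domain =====

-- B builds the digit list iteratively and tests membership of 7, instead of A's short-circuiting tail recursion (objective: alternative).


theorem pv_fdiv10_lt (k : Int) (h : ¬ k < 10) : (PySem.Int.floordiv k 10).toNat < k.toNat := by
  rw [PySem.Int.floordiv_eq_ediv_of_pos (by omega)]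
  omega

-- ===== PORT A =====
def has_seven (k : Int) : Bool :=
  if PySem.Int.mod k 10 == 7 then true
  else if k < 10 then false
  else has_seven (PySem.Int.floordiv k 10)
termination_by k.toNat
decreasing_by exact pv_fdiv10_lt k (by assumption)

-- ===== PORT B =====
-- the while-loop of Source B: collect k % 10 while k >= 10, finally append k
def pvDigits (k : Int) : List Int :=
  if k < 10 then [k]
  else PySem.Int.mod k 10 :: pvDigits (PySem.Int.floordiv k 10)
termination_by k.toNat
decreasing_by exact pv_fdiv10_lt k (by assumption)

def has_seven_alt (k : Int) : Bool :=
  if k < 10 then PySem.Int.mod k 10 == 7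
  else (pvDigits k).contains 7

-- ===== PRECONDITION & SPEC =====
def Spec_has_seven (k : Int) (out : Bool) : Prop := out = has_seven_alt k
instance (k : Int) (out : Bool) : Decidable (Spec_has_seven k out) := by unfold Spec_has_seven; infer_instance

-- ===== CLAIM (what is proved, stated in full; the proofs are below) =====
def Claim_equal_has_seven : Prop := ∀ (k : Int), Dom_has_seven k → Spec_has_seven k (has_seven k)

-- ===== LEMMAS AND PROOFS =====

theorem pv_beq_comm (a b : Int) : (a == b) = decide (b = a) := by
  by_cases h : a = b
  · subst h; simp
  · have h' : ¬ b = a := fun hh => h hh.symm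
    simp [h, h']

-- for nonnegative k, A equals membership of 7 in the full digit list
theorem has_seven_eq_digits (n : Nat) : ∀ k : Int, k.toNat ≤ n → 0 ≤ k →
    has_seven k = (pvDigits k).contains 7 := by
  induction n with
  | zero =>
    intro k hle h0
    have hk : k = 0 := by omega
    subst hk
    have hm : PySem.Int.mod 0 10 = 0 := by
      rw [PySem.Int.mod_eq_emod_of_pos (by omega)]; decide
    rw [has_seven, pvDigits]
    norm_num [hm]
  | succ n ih =>
    intro k hle h0
    have hme : PySem.Int.mod k 10 = k % 10 := PySem.Int.mod_eq_emod_of_pos (by omega)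
    rw [has_seven, pvDigits]
    by_cases hlt : k < 10
    · have hm : k % 10 = k := by omega
      simp only [hlt, if_true, List.contains_cons]
      by_cases h7 : k = 7 <;> simp [hme, hm, h7, pv_beq_comm] <;> omega
    · have hrec := ih (PySem.Int.floordiv k 10)
        (by have := pv_fdiv10_lt k hlt; omega)
        (by rw [PySem.Int.floordiv_eq_ediv_of_pos (by omega)]; omega)
      simp only [hlt, if_false, List.contains_cons]
      rw [← hrec]
      by_cases h7 : k % 10 = 7 <;> simp [hme, h7, pv_beq_comm] <;> omega

-- ===== VERDICT (by name: the statement is the Claim_ definition above) =====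
theorem has_seven_spec : Claim_equal_has_seven := by
  intro k _
  unfold Spec_has_seven has_seven_alt
  by_cases hlt : k < 10
  · rw [has_seven]
    by_cases h7 : PySem.Int.mod k 10 = 7 <;> simp [hlt, h7, pv_beq_comm]
  · simp only [hlt, if_false]
    exact has_seven_eq_digits k.toNat k le_rfl (by omega)
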